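-- pv_equiv track=rewrite | github.com/to24toro/Atcoder | ABC210/D.py | helper
-- ===== SOURCE A (Python) =====
-- def helper(h,w,a):
--     da = [[0]*w for j in range(h)]
--     da[0][0] = a[0][0]
--     for i in range(1,w):
--         da[0][i] = min(da[0][i-1],a[0][i])
--     for i in range(1,h):
--         cnt_w = 0
--         for j in range(w):
--             cnt_w = a[i][j]
--             da[i][j] = min(da[i-1][j],cnt_w)
--     return da
-- ===== SOURCE B (Python) =====
-- def helper(h, w, a):
--     r0, *rest = (a[i] for i in range(h))
--     # Prefix minima of row 0, kept in a running scalar.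
--     p = []
--     m = r0[0]
--     for j in range(w):
--         m = min(m, r0[j])
--         p.append(m)
--     # Running column minima over rows 0..i; each output row is the pointwise
--     # min of p with that vector: min distributes, so min(p[j], colmin(0..i, j))
--     # equals A's table entry.
--     out = [p]
--     c = [r0[j] for j in range(w)]
--     for row in rest:
--         c = [min(c[j], row[j]) for j in range(w)]
--         out.append([min(x, y) for x, y in zip(p, c)])
--     return out
-- ===== Notes on version B (the rewrite author's own statement) =====
-- stated objective: alternative
-- what changed: B abandons A's DP table recurrence min(da[i-1][j], a[i][j]): it computes the row-0 prefix-minimum vector p and, separately, a running column-minimum vector over whole rows (built by zipping each row into it), emitting each output row as the pointwise min of p with that vector — correct because min is associative/commutative, and with no preallocated table or index arithmetic at all.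
import Mathlib
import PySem

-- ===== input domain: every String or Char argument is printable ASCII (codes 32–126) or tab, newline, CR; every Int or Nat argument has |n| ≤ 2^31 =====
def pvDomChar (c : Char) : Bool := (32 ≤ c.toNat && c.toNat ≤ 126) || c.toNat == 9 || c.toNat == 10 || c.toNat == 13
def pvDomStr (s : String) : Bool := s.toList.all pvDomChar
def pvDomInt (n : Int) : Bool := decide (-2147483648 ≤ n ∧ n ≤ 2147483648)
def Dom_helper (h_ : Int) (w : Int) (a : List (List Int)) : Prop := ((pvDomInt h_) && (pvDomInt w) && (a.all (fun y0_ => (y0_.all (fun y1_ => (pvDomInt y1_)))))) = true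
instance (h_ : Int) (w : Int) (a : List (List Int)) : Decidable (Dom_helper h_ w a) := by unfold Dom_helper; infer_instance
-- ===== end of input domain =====

-- B drops A's DP-table recurrence: it builds the row-0 prefix-min vector and a running
-- column-min vector over whole rows, emitting each output row as their pointwise min.


-- ===== PORT A =====
-- m[i][j] read / write with defaults; inside Pre_ every index is in range, so these are exact.
def getRC (m : List (List Int)) (i j : Int) : Int :=
  PySem.List.pyGetD (PySem.List.pyGetD m i ([] : List Int)) j 0

def setRC (m : List (List Int)) (i j : Int) (v : Int) : List (List Int) :=
  PySem.List.pySetD m i (PySem.List.pySetD (PySem.List.pyGetD m i ([] : List Int)) j v)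

def helper (h_ : Int) (w : Int) (a : List (List Int)) : List (List Int) :=
  let da := List.replicate h_.toNat (List.replicate w.toNat (0 : Int))
  let da := setRC da 0 0 (getRC a 0 0)
  let da := (PySem.List.pyRange 1 w).foldl
      (fun da i => setRC da 0 i (min (getRC da 0 (i - 1)) (getRC a 0 i))) da
  let da := (PySem.List.pyRange 1 h_).foldl
      (fun da i => (PySem.List.pyRange 0 w).foldl
        (fun da j =>
          let cnt_w := getRC a i j
          setRC da i j (min (getRC da (i - 1) j) cnt_w)) da) da
  da

-- ===== PORT B =====
def helper_alt (h_ : Int) (w : Int) (a : List (List Int)) : List (List Int) :=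
  -- r0, *rest = (a[i] for i in range(h)); inside Pre_ these indices are in range, so
  -- pyGetD/slice are exact there
  let r0 := PySem.List.pyGetD a 0 ([] : List Int)
  let rest := PySem.List.slice a (some 1) (some h_)
  -- p = prefix minima of row 0 (running scalar m, initialised to r0[0])
  let p := ((PySem.List.pyRange 0 w).foldl
      (fun (st : List Int × Int) j =>
        let m := min st.2 (PySem.List.pyGetD r0 j 0)
        (st.1 ++ [m], m)) (([] : List Int), PySem.List.pyGetD r0 0 0)).1
  -- c = running column minima over rows 0..i; each output row = pointwise min of p and c
  let c0 := (PySem.List.pyRange 0 w).map (fun j => PySem.List.pyGetD r0 j 0)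
  (rest.foldl
      (fun (st : List (List Int) × List Int) row =>
        let c := (PySem.List.pyRange 0 w).map
          (fun j => min (PySem.List.pyGetD st.2 j 0) (PySem.List.pyGetD row j 0))
        (st.1 ++ [(p.zip c).map (fun q => min q.1 q.2)], c)) ([p], c0)).1

-- ===== PRECONDITION & SPEC =====
-- Pre_: exactly where the Python A returns (it raises IndexError when h < 1, w < 1, a has
-- fewer than h rows, or one of the first h rows has fewer than w entries).
def Pre_helper (h_ : Int) (w : Int) (a : List (List Int)) : Prop :=
  1 ≤ h_ ∧ 1 ≤ w ∧ h_ ≤ (a.length : Int) ∧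
    (a.take h_.toNat).all (fun r => w ≤ (r.length : Int))
instance (h_ : Int) (w : Int) (a : List (List Int)) : Decidable (Pre_helper h_ w a) := by unfold Pre_helper; infer_instance

def pvWitness_helper : Int × Int × List (List Int) := (2, 2, [[1, 2], [3, 0]])

def Spec_helper (h_ : Int) (w : Int) (a : List (List Int)) (out : List (List Int)) : Prop := out = helper_alt h_ w a
instance (h_ : Int) (w : Int) (a : List (List Int)) (out : List (List Int)) : Decidable (Spec_helper h_ w a out) := by unfold Spec_helper; infer_instance

-- ===== CLAIM (what is proved, stated in full; the proofs are below) =====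
def Claim_equal_helper : Prop := ∀ (h_ : Int) (w : Int) (a : List (List Int)), Dom_helper h_ w a → Pre_helper h_ w a → Spec_helper h_ w a (helper h_ w a)

-- ===== LEMMAS AND PROOFS =====

-- entry (i, j) of the input, with Python-default 0 out of range (never hit inside Pre_)
def g (a : List (List Int)) (i j : Nat) : Int := (a.getD i []).getD j 0

-- the common mathematical value of cell (i, j): prefix minimum along row 0, then down column j
def M (a : List (List Int)) : Nat → Nat → Int
  | 0, 0 => g a 0 0
  | 0, j + 1 => min (M a 0 j) (g a 0 (j + 1))
  | i + 1, j => min (M a i j) (g a (i + 1) j)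

def rowM (a : List (List Int)) (W i : Nat) : List Int := (List.range W).map (fun j => M a i j)

-- the common normal form of both ports' results
def NF (a : List (List Int)) (H W : Nat) : List (List Int) := (List.range H).map (rowM a W)

-- total get/set with a nonnegative Int index
theorem pyGetD_nonneg {α : Type} (xs : List α) (i : Int) (d : α) (h : 0 ≤ i) :
    PySem.List.pyGetD xs i d = xs.getD i.toNat d := by
  conv_lhs => rw [← Int.toNat_of_nonneg h]
  rw [PySem.List.pyGetD_natCast]

theorem getRC_int (m : List (List Int)) (i j : Int) (hi : 0 ≤ i) (hj : 0 ≤ j) :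
    getRC m i j = (m.getD i.toNat []).getD j.toNat 0 := by
  rw [getRC, pyGetD_nonneg m i _ hi, pyGetD_nonneg _ j _ hj]

theorem getRC_map_range (f : Nat → List Int) (H : Nat) (i j : Int)
    (hi0 : 0 ≤ i) (hiH : i.toNat < H) (hj : 0 ≤ j) :
    getRC ((List.range H).map f) i j = (f i.toNat).getD j.toNat 0 := by
  rw [getRC_int _ _ _ hi0 hj, PySem.List.getD_map_range f H i.toNat _ hiH]

theorem set_map_range' {β : Type} (F : Nat → β) (W k : Nat) (v : β) :
    ((List.range W).map F).set k v
      = (List.range W).map (fun j => if j = k then v else F j) := by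
  apply List.ext_getElem
  · simp
  · intro i h1 h2
    simp only [List.getElem_set, List.getElem_map, List.getElem_range]
    by_cases h : i = k
    · simp [h]
    · simp [h, Ne.symm h]

theorem setRC_map_range (f : Nat → List Int) (H : Nat) (i j : Int) (v : Int)
    (hi0 : 0 ≤ i) (hiH : i.toNat < H) (hj : 0 ≤ j) :
    setRC ((List.range H).map f) i j v
      = (List.range H).map (fun r => if r = i.toNat then (f i.toNat).set j.toNat v else f r) := by
  rw [setRC, pyGetD_nonneg _ i _ hi0, PySem.List.getD_map_range f H i.toNat _ hiH,
    PySem.List.pySetD_of_nonneg _ _ hj, PySem.List.pySetD_of_nonneg _ _ hi0,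
    set_map_range']

theorem setRC_nil (i j : Int) (v : Int) : setRC ([] : List (List Int)) i j v = [] := by
  rw [setRC]
  simp [PySem.List.pySetD, PySem.List.pySet?]
  cases PySem.List.pyIdx? 0 i <;> rfl

theorem M_zero_zero (a : List (List Int)) : M a 0 0 = g a 0 0 := by simp [M]

theorem M_zero_succ (a : List (List Int)) (j : Nat) :
    M a 0 (j + 1) = min (M a 0 j) (g a 0 (j + 1)) := by simp [M]

theorem M_succ (a : List (List Int)) (i j : Nat) :
    M a (i + 1) j = min (M a i j) (g a (i + 1) j) := by simp [M]

theorem rowM_nil (a : List (List Int)) (i : Nat) : rowM a 0 i = [] := rfl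

-- ===== A side: helper = NF =====

-- partially filled row 0 (prefix-min up to column t)
def pr0 (a : List (List Int)) (W t : Nat) : List Int :=
  (List.range W).map (fun j => if j ≤ t then M a 0 j else 0)

-- partially filled row t (first k columns done)
def pri (a : List (List Int)) (W t k : Nat) : List Int :=
  (List.range W).map (fun j => if j < k then M a t j else 0)

-- the matrix after rows 0..t-1 have been filled
def stOuter (a : List (List Int)) (H W t : Nat) : List (List Int) :=
  (List.range H).map (fun r => if r < t then rowM a W r else List.replicate W 0)

theorem replicate_eq_map_range {β : Type} (n : Nat) (x : β) :
    List.replicate n x = (List.range n).map (fun _ => x) := by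
  rw [List.map_const', List.length_range]

theorem row0_fold (a : List (List Int)) (H W : Nat) (hH : 0 < H) :
    ∀ t : Nat, t < W →
    (PySem.List.pyRange 1 (1 + (t : Int))).foldl
      (fun da i => setRC da 0 i (min (getRC da 0 (i - 1)) (getRC a 0 i)))
      ((List.range H).map (fun r => if r = 0 then pr0 a W 0 else List.replicate W 0))
    = (List.range H).map (fun r => if r = 0 then pr0 a W t else List.replicate W 0) := by
  intro t
  induction t with
  | zero => intro _; rw [PySem.List.pyRange_one_eq_nil (by norm_num)]; rfl
  | succ t ih =>
    intro htW
    have h1 : (1 : Int) + ((t + 1 : Nat) : Int) = (1 + (t : Int)) + 1 := by push_cast; ring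
    rw [h1, PySem.List.pyRange_one_succ_right (by omega), List.foldl_append,
      ih (by omega)]
    simp only [List.foldl_cons, List.foldl_nil]
    have hrd : getRC ((List.range H).map fun r => if r = 0 then pr0 a W t else List.replicate W 0)
        0 (1 + (t : Int) - 1) = M a 0 t := by
      rw [getRC_map_range _ H _ _ (by norm_num) (by simpa using hH) (by omega)]
      have h2 : ((1 : Int) + (t : Int) - 1).toNat = t := by omega
      rw [h2]
      simp only [Int.toNat_zero, pr0, eq_self_iff_true, if_true]
      rw [PySem.List.getD_map_range _ W t _ (by omega)]
      simp
    have hra : getRC a 0 (1 + (t : Int)) = g a 0 (t + 1) := by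
      rw [getRC_int _ _ _ (by norm_num) (by omega), g]
      congr 1 <;> omega
    rw [hrd, hra, setRC_map_range _ H _ _ _ (by norm_num) (by simpa using hH) (by omega)]
    apply List.map_congr_left
    intro r hr
    by_cases h0 : r = 0
    · subst h0
      simp only [Int.toNat_zero, pr0, eq_self_iff_true, if_true]
      have htn : ((1 : Int) + (t : Int)).toNat = t + 1 := by omega
      rw [htn, set_map_range']
      apply List.map_congr_left
      intro j hj
      by_cases hjt : j = t + 1
      · subst hjt; simp [M_zero_succ]
      · by_cases hjle : j ≤ t
        · simp [hjt, hjle, Nat.le_succ_of_le hjle]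
        · have h3 : ¬ j ≤ t + 1 := by omega
          simp [hjt, hjle, h3]
    · simp [h0]

-- state after the first two statements of A (row 0 fully written)
theorem phaseA1 (a : List (List Int)) (h_ w : Int) (hH : 0 < h_.toNat) :
    (PySem.List.pyRange 1 w).foldl
      (fun da i => setRC da 0 i (min (getRC da 0 (i - 1)) (getRC a 0 i)))
      (setRC (List.replicate h_.toNat (List.replicate w.toNat 0)) 0 0 (getRC a 0 0))
    = stOuter a h_.toNat w.toNat 1 := by
  set H := h_.toNat with hHe
  set W := w.toNat with hWe
  have hset : setRC (List.replicate H (List.replicate W (0:Int))) 0 0 (getRC a 0 0)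
      = (List.range H).map (fun r => if r = 0 then pr0 a W 0 else List.replicate W 0) := by
    rw [replicate_eq_map_range H, setRC_map_range _ H _ _ _ (by norm_num) (by simpa using hH) (by norm_num)]
    apply List.map_congr_left
    intro r hr
    by_cases h0 : r = 0
    · subst h0
      simp only [Int.toNat_zero, eq_self_iff_true, if_true]
      cases W with
      | zero => rfl
      | succ W' =>
        rw [replicate_eq_map_range, set_map_range']
        apply List.map_congr_left
        intro j hj
        have hg : getRC a 0 0 = M a 0 0 := by
          rw [getRC_int _ _ _ le_rfl le_rfl, M_zero_zero]; rfl
        by_cases hj0 : j = 0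
        · subst hj0; simp [pr0, hg]
        · have h3 : ¬ j ≤ 0 := by omega
          simp [pr0, hj0, h3]
    · simp [h0]
  rw [hset]
  by_cases hw : w ≤ 0
  · have hW0 : W = 0 := by omega
    rw [PySem.List.pyRange_one_eq_nil (by omega)]
    simp only [List.foldl_nil, stOuter, hW0]
    apply List.map_congr_left
    intro r hr
    by_cases h0 : r = 0 <;> simp [h0, pr0, rowM]
  · have hW1 : 1 ≤ W := by omega
    have hb : w = 1 + ((W - 1 : Nat) : Int) := by omega
    rw [hb, row0_fold a H W hH (W - 1) (by omega)]
    unfold stOuter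
    apply List.map_congr_left
    intro r hr
    by_cases h0 : r = 0
    · subst h0
      simp only [if_pos rfl, Nat.lt_one_iff, pr0, rowM]
      apply List.map_congr_left
      intro j hj
      simp only [List.mem_range] at hj
      simp [Nat.le_sub_one_of_lt hj]
    · have h3 : ¬ r < 1 := by omega
      simp [h0, h3]

theorem pri_full (a : List (List Int)) (W t : Nat) : pri a W t W = rowM a W t := by
  unfold pri rowM
  apply List.map_congr_left
  intro j hj
  simp only [List.mem_range] at hj
  simp [hj]

theorem inner_fold (a : List (List Int)) (H W : Nat) (t : Nat) (ht1 : 1 ≤ t) (htH : t < H) :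
    ∀ k : Nat, k ≤ W →
    (PySem.List.pyRange 0 (k : Int)).foldl
      (fun da j => setRC da (t : Int) j (min (getRC da ((t : Int) - 1) j) (getRC a (t : Int) j)))
      (stOuter a H W t)
    = (List.range H).map
        (fun r => if r = t then pri a W t k
                  else if r < t then rowM a W r else List.replicate W 0) := by
  intro k
  induction k with
  | zero =>
    intro _
    rw [show ((0 : Nat) : Int) = 0 from rfl, PySem.List.pyRange_one_eq_nil le_rfl]
    simp only [List.foldl_nil, stOuter]
    apply List.map_congr_left
    intro r hr
    by_cases hrt : r = t
    · subst hrt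
      have h2 : pri a W r 0 = List.replicate W 0 := by
        rw [pri, replicate_eq_map_range]
        apply List.map_congr_left
        intro j hj
        simp
      simp [h2]
    · simp [hrt]
  | succ k ih =>
    intro hkW
    have h1 : ((k + 1 : Nat) : Int) = (k : Int) + 1 := by push_cast; ring
    rw [h1, PySem.List.pyRange_one_succ_right (by omega), List.foldl_append,
      ih (by omega)]
    simp only [List.foldl_cons, List.foldl_nil]
    have hrd : getRC ((List.range H).map fun r =>
          if r = t then pri a W t k else if r < t then rowM a W r else List.replicate W 0)
        ((t : Int) - 1) (k : Int) = M a (t - 1) k := by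
      have htn : ((t : Int) - 1).toNat = t - 1 := by omega
      rw [getRC_map_range _ H _ _ (by omega) (by omega) (by omega), htn]
      have hne : ¬ (t - 1 = t) := by omega
      have hlt : t - 1 < t := by omega
      simp only [if_neg hne, if_pos hlt, rowM, Int.toNat_natCast]
      rw [PySem.List.getD_map_range _ W k _ (by omega)]
    have hra : getRC a (t : Int) (k : Int) = g a t k := by
      rw [getRC_int _ _ _ (by omega) (by omega), g]; simp
    simp only [hrd, hra]
    rw [setRC_map_range _ H _ _ _ (by omega) (by simpa using htH) (by omega)]
    apply List.map_congr_left
    intro r hr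
    by_cases hrt : r = t
    · subst hrt
      simp only [Int.toNat_natCast, pri, eq_self_iff_true, if_true]
      rw [set_map_range']
      apply List.map_congr_left
      intro j hj
      by_cases hjk : j = k
      · subst hjk
        have h2 : j < j + 1 := by omega
        have h3 : M a (r - 1 + 1) j = min (M a (r - 1) j) (g a (r - 1 + 1) j) := M_succ a (r - 1) j
        have h4 : r - 1 + 1 = r := by omega
        rw [h4] at h3
        simp [h2, h3]
      · by_cases hjlt : j < k
        · simp [hjk, hjlt, Nat.lt_succ_of_lt hjlt]
        · have h5 : ¬ j < k + 1 := by omega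
          simp [hjk, hjlt, h5]
    · simp [Int.toNat_natCast, hrt]

theorem outer_fold (a : List (List Int)) (H : Nat) (w : Int) (hH : 0 < H) :
    ∀ t : Nat, 1 ≤ t → t ≤ H →
    (PySem.List.pyRange 1 (t : Int)).foldl
      (fun da i => (PySem.List.pyRange 0 w).foldl
        (fun da j => setRC da i j (min (getRC da (i - 1) j) (getRC a i j))) da)
      (stOuter a H w.toNat 1)
    = stOuter a H w.toNat t := by
  intro t
  induction t with
  | zero => intro h; omega
  | succ t ih =>
    intro _ htH
    by_cases ht0 : t = 0
    · subst ht0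
      rw [show ((0 + 1 : Nat) : Int) = 1 from rfl, PySem.List.pyRange_one_eq_nil le_rfl]
      rfl
    · have h1 : ((t + 1 : Nat) : Int) = (t : Int) + 1 := by push_cast; ring
      rw [h1, PySem.List.pyRange_one_succ_right (by omega), List.foldl_append,
        ih (by omega) (by omega)]
      simp only [List.foldl_cons, List.foldl_nil]
      by_cases hw : w ≤ 0
      · rw [PySem.List.pyRange_one_eq_nil (by omega)]
        simp only [List.foldl_nil, stOuter]
        have hW0 : w.toNat = 0 := by omega
        rw [hW0]
        apply List.map_congr_left
        intro r hr
        simp [rowM_nil, List.replicate]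
      · have hWw : ((w.toNat : Nat) : Int) = w := by omega
        rw [← hWw]
        simp only [Int.toNat_natCast]
        rw [inner_fold a H w.toNat t (by omega) (by omega) w.toNat le_rfl]
        unfold stOuter
        apply List.map_congr_left
        intro r hr
        by_cases hrt : r = t
        · subst hrt
          have h2 : r < r + 1 := by omega
          simp [pri_full, h2]
        · by_cases hlt : r < t
          · simp [hrt, hlt, Nat.lt_succ_of_lt hlt]
          · have h3 : ¬ r < t + 1 := by omega
            simp [hrt, hlt, h3]

theorem helper_eq_NF (h_ w : Int) (a : List (List Int)) :
    helper h_ w a = NF a h_.toNat w.toNat := by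
  by_cases hH : h_.toNat = 0
  · simp only [helper, NF]
    rw [hH]
    simp only [List.replicate, List.range_zero, List.map_nil]
    rw [setRC_nil]
    rw [List.foldl_fixed' (fun i => setRC_nil 0 i (min (getRC [] 0 (i - 1)) (getRC a 0 i)))
      (PySem.List.pyRange 1 w)]
    rw [List.foldl_fixed'
      (fun i => List.foldl_fixed'
        (fun j => setRC_nil i j (min (getRC [] (i - 1) j) (getRC a i j)))
        (PySem.List.pyRange 0 w))
      (PySem.List.pyRange 1 h_)]
  · have hH1 : 0 < h_.toNat := by omega
    have hcast : ((h_.toNat : Nat) : Int) = h_ := by omega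
    simp only [helper]
    rw [phaseA1 a h_ w hH1, ← hcast]
    simp only [Int.toNat_natCast]
    rw [outer_fold a h_.toNat w hH1 h_.toNat (by omega) le_rfl]
    unfold stOuter NF
    apply List.map_congr_left
    intro r hr
    simp only [List.mem_range] at hr
    simp [hr]

-- ===== B side: helper_alt = NF on Pre_ =====

-- running column minimum over rows 0..i, column j
def colmin (a : List (List Int)) : Nat -> Nat -> Int
  | 0, j => g a 0 j
  | i + 1, j => min (colmin a i j) (g a (i + 1) j)

theorem M0_le_g (a : List (List Int)) (j : Nat) : M a 0 j <= g a 0 j := by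
  cases j with
  | zero => rw [M_zero_zero]
  | succ j => rw [M_zero_succ]; exact min_le_right _ _

-- key algebraic fact: min distributes, so p[j] min colmin(i, j) is A's table entry
theorem keyMin (a : List (List Int)) (i j : Nat) :
    min (M a 0 j) (colmin a i j) = M a i j := by
  induction i with
  | zero => exact min_eq_left (M0_le_g a j)
  | succ i ih =>
    show min (M a 0 j) (min (colmin a i j) (g a (i + 1) j)) = _
    rw [<- min_assoc, ih, <- M_succ]

-- zip-with-min of a range-map against a long-enough list, as a range-map
theorem zipmin_map_range (f : Nat -> Int) (W : Nat) (l : List Int) (hl : W <= l.length) :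
    ((((List.range W).map f).zip l).map (fun q => min q.1 q.2))
      = (List.range W).map (fun j => min (f j) (l.getD j 0)) := by
  apply List.ext_getElem
  . simp; omega
  . intro i h1 h2
    have hil : i < l.length := by
      simp only [List.length_map, List.length_zip, List.length_range] at h1
      omega
    simp only [List.getElem_map, List.getElem_zip, List.getElem_range,
      List.getD_eq_getElem?_getD, List.getElem?_eq_getElem hil, Option.getD_some]

-- mapping over range(0, t) is mapping over List.range t
theorem map_pyRange {b : Type} (f : Int -> b) : forall t : Nat,
    (PySem.List.pyRange 0 (t : Int)).map f = (List.range t).map (fun (j : Nat) => f (j : Int)) := by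
  intro t
  induction t with
  | zero => rw [show ((0 : Nat) : Int) = 0 from rfl, PySem.List.pyRange_one_eq_nil le_rfl]; rfl
  | succ t ih =>
    have h1 : ((t + 1 : Nat) : Int) = (t : Int) + 1 := by push_cast; ring
    rw [h1, PySem.List.pyRange_one_succ_right (by omega), List.map_append, ih,
      List.range_succ, List.map_append]
    rfl

-- B's prefix-min scan over row 0
theorem p_scan (a : List (List Int)) : forall t : Nat,
    (PySem.List.pyRange 0 (t : Int)).foldl
      (fun (st : List Int × Int) j =>
        (st.1 ++ [min st.2 (PySem.List.pyGetD (a.getD 0 []) j 0)],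
         min st.2 (PySem.List.pyGetD (a.getD 0 []) j 0)))
      (([] : List Int), g a 0 0)
    = ((List.range t).map (M a 0), M a 0 (t - 1)) := by
  intro t
  induction t with
  | zero =>
    rw [show ((0 : Nat) : Int) = 0 from rfl, PySem.List.pyRange_one_eq_nil le_rfl]
    simp [M_zero_zero]
  | succ t ih =>
    have h1 : ((t + 1 : Nat) : Int) = (t : Int) + 1 := by push_cast; ring
    rw [h1, PySem.List.pyRange_one_succ_right (by omega), List.foldl_append, ih]
    simp only [List.foldl_cons, List.foldl_nil]
    have hg : PySem.List.pyGetD (a.getD 0 []) (t : Int) 0 = g a 0 t := by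
      rw [PySem.List.pyGetD_natCast]; rfl
    have hm : min (M a 0 (t - 1)) (g a 0 t) = M a 0 t := by
      cases t with
      | zero => simp [M_zero_zero]
      | succ t => rw [Nat.succ_sub_one, <- M_zero_succ]
    rw [hg, hm, List.range_succ, List.map_append]
    simp

-- B's main fold: after consuming rows 1..n, the output holds rows 0..n of NF and
-- the accumulator holds the column minima over rows 0..n
theorem b_fold (a : List (List Int)) (H W : Nat) (hlen : H <= a.length) :
    forall n : Nat, n < H ->
    ((a.drop 1).take n).foldl
      (fun (st : List (List Int) × List Int) row =>
        (st.1 ++ [((((List.range W).map (M a 0)).zip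
            ((PySem.List.pyRange 0 ((W : Nat) : Int)).map
              (fun j => min (PySem.List.pyGetD st.2 j 0) (PySem.List.pyGetD row j 0)))).map
            (fun q => min q.1 q.2))],
         (PySem.List.pyRange 0 ((W : Nat) : Int)).map
           (fun j => min (PySem.List.pyGetD st.2 j 0) (PySem.List.pyGetD row j 0))))
      ([(List.range W).map (M a 0)], (List.range W).map (colmin a 0))
    = ((List.range (n + 1)).map (rowM a W), (List.range W).map (colmin a n)) := by
  intro n
  induction n with
  | zero =>
    intro _
    simp only [List.take_zero, List.foldl_nil]
    congr 1
  | succ n ih =>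
    intro hnH
    have hlt : n < (a.drop 1).length := by
      rw [List.length_drop]; omega
    rw [List.take_succ, List.getElem?_eq_getElem hlt]
    simp only [Option.toList_some, List.foldl_append, ih (by omega), List.foldl_cons,
      List.foldl_nil]
    have hrow : (a.drop 1)[n] = a.getD (n + 1) [] := by
      have h1 : n + 1 < a.length := by omega
      rw [List.getElem_drop]
      rw [List.getD_eq_getElem?_getD, List.getElem?_eq_getElem h1, Option.getD_some]
      congr 1
      omega
    have hc : (PySem.List.pyRange 0 ((W : Nat) : Int)).map
        (fun j => min (PySem.List.pyGetD ((List.range W).map (colmin a n)) j 0)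
          (PySem.List.pyGetD ((a.drop 1)[n]) j 0))
        = (List.range W).map (colmin a (n + 1)) := by
      rw [map_pyRange]
      apply List.map_congr_left
      intro j hj
      simp only [List.mem_range] at hj
      rw [PySem.List.pyGetD_natCast, PySem.List.pyGetD_natCast,
        PySem.List.getD_map_range _ W j _ hj, hrow]
      rfl
    rw [hc]
    have hout : ((((List.range W).map (M a 0)).zip ((List.range W).map (colmin a (n + 1)))).map
        (fun q => min q.1 q.2)) = rowM a W (n + 1) := by
      rw [zipmin_map_range _ _ _ (by simp)]
      unfold rowM
      apply List.map_congr_left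
      intro j hj
      simp only [List.mem_range] at hj
      rw [PySem.List.getD_map_range _ W j _ hj, keyMin]
    rw [hout]
    simp [List.range_succ]

theorem helper_alt_eq_NF (h_ w : Int) (a : List (List Int))
    (hPre : Pre_helper h_ w a) : helper_alt h_ w a = NF a h_.toNat w.toNat := by
  obtain ⟨hh1, hw1, hha, _⟩ := hPre
  obtain ⟨W, hW⟩ : ∃ W : Nat, w = (W : Int) := ⟨w.toNat, by omega⟩
  obtain ⟨H, hH⟩ : ∃ H : Nat, h_ = (H : Int) := ⟨h_.toNat, by omega⟩
  subst hW
  subst hH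
  simp only [Int.toNat_natCast]
  have hH1 : 1 <= H := by omega
  have hlen : H <= a.length := by
    have := hha
    omega
  have hrow0 : PySem.List.pyGetD a 0 ([] : List Int) = a.getD 0 [] :=
    pyGetD_nonneg a 0 [] le_rfl
  have hg00 : PySem.List.pyGetD (a.getD 0 []) (0 : Int) 0 = g a 0 0 := by
    rw [pyGetD_nonneg _ _ _ le_rfl]; rfl
  have hp : ((PySem.List.pyRange 0 ((W : Nat) : Int)).foldl
      (fun (st : List Int × Int) j =>
        (st.1 ++ [min st.2 (PySem.List.pyGetD (a.getD 0 []) j 0)],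
         min st.2 (PySem.List.pyGetD (a.getD 0 []) j 0)))
      (([] : List Int), PySem.List.pyGetD (a.getD 0 []) (0 : Int) 0)).1
      = (List.range W).map (M a 0) := by
    rw [hg00, p_scan a W]
  have hc0 : (PySem.List.pyRange 0 ((W : Nat) : Int)).map
      (fun j => PySem.List.pyGetD (a.getD 0 []) j 0)
      = (List.range W).map (colmin a 0) := by
    rw [map_pyRange]
    apply List.map_congr_left
    intro j hj
    rw [PySem.List.pyGetD_natCast]
    rfl
  have hsliceA : PySem.List.slice a (some 1) (some ((H : Nat) : Int)) = (a.drop 1).take (H - 1) := by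
    rw [PySem.List.slice_toNat a (by norm_num) (by omega)]
    norm_num
  simp only [helper_alt]
  rw [hrow0, hp, hc0, hsliceA, b_fold a H W hlen (H - 1) (by omega)]
  have h2 : H - 1 + 1 = H := by omega
  rw [h2]
  unfold NF rowM
  rfl

-- ===== VERDICT (by name: the statement is the Claim_ definition above) =====
theorem helper_spec : Claim_equal_helper := by
  intro h_ w a _ hPre
  unfold Spec_helper
  rw [helper_eq_NF, helper_alt_eq_NF _ _ _ hPre]
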